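-- pv_equiv track=rewrite | github.com/Kuhron/programming | Language/ConlangWorkspace/LanguageEvolutionTools.py | parse_brackets_and_blanks
-- ===== SOURCE A (Python) =====
-- def parse_brackets_and_blanks(s):
--     assert type(s) is str
--     lst = []
--     inside_brackets = False
--     current_item = ""
--     for c in s:
--         if inside_brackets:
--             assert c != "["
--             # no nesting allowed, no meta-digraphs
--             if c == "]":
--                 current_item += c
--                 lst.append(current_item)
--                 current_item = ""
--                 inside_brackets = False
--             else:
--                 current_item += c
--         else:
--             if c == "[":
--                 assert current_item == ""
--                 current_item += c
--                 inside_brackets = True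
--             elif c == "-":
--                 # use this to make blanks in rules with string notation
--                 lst.append("")
--             else:
--                 lst.append(c)
--     return lst
-- ===== SOURCE B (Python) =====
-- def parse_brackets_and_blanks(s):
--     assert type(s) is str
--     lst = []
--     rest = s
--     while rest:
--         c, rest = rest[0], rest[1:]
--         if c == "[":
--             body, sep, tail = rest.partition("]")
--             assert "[" not in body  # a nested opening bracket before a close is an error, as in the original
--             if not sep:
--                 break  # unclosed bracket: drop the remainder
--             lst.append("[" + body + "]")
--             rest = tail
--         elif c == "-":
--             lst.append("")
--         else:
--             lst.append(c)
--     return lst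
-- ===== Notes on version B (the rewrite author's own statement) =====
-- stated objective: simpler
-- what changed: Replaced the per-character state machine (inside_brackets flag + current_item accumulator) with a consume-the-remainder loop that takes each whole bracketed token in a single partition step; no character-by-character accumulation state.
import Mathlib
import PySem

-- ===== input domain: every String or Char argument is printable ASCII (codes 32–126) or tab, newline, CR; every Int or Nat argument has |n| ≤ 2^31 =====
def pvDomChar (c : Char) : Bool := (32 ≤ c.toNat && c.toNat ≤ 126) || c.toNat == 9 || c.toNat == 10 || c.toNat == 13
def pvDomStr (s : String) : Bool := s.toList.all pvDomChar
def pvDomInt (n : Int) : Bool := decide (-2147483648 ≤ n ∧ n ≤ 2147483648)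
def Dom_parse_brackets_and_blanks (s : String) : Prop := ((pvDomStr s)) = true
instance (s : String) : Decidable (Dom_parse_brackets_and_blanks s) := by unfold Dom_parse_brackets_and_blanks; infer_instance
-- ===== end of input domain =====

-- B replaces A's inside_brackets flag/character accumulator with a consume-the-remainder loop
-- that takes each whole bracketed token in one partition step (objective: simpler decomposition).

-- ===== PORT A =====
-- state = (lst, inside_brackets, current_item); one fold step per character, as in A's for-loop.
-- current_item is kept as List Char (string ops ported on the char-list side, per PySem convention).
def pbbStepA (st : List String × Bool × List Char) (c : Char) : List String × Bool × List Char :=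
  match st with
  | (lst, inside, cur) =>
    if inside then
      -- Python asserts c is not an opening bracket here; inputs where that fires are excluded by Pre_
      if c = ']' then (lst ++ [String.ofList (cur ++ [c])], false, [])
      else (lst, true, cur ++ [c])
    else
      if c = '[' then (lst, true, cur ++ [c])   -- assert current_item == "" (always holds)
      else if c = '-' then (lst ++ [""], false, cur)
      else (lst ++ [String.ofList [c]], false, cur)

def parse_brackets_and_blanks (s : String) : List String :=
  (s.toList.foldl pbbStepA ([], false, [])).1

-- ===== PORT B =====
-- B's while-loop over the remainder; Python's rest.partition of the closing bracket
-- = (takeWhile before it, the separator, the part after)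
def pbbLoopB (lst : List String) (rest : List Char) : List String :=
  match rest with
  | [] => lst
  | c :: rest =>
    if c = '[' then
      let body := rest.takeWhile (fun x => x ≠ ']')
      -- Python asserts no opening bracket in body; inputs where that fires are excluded by Pre_
      match hdr : rest.dropWhile (fun x => x ≠ ']') with
      | [] => lst                                   -- sep empty: unclosed bracket, break
      | _ :: t => pbbLoopB (lst ++ [String.ofList ('[' :: (body ++ [']']))]) t
    else if c = '-' then pbbLoopB (lst ++ [""]) rest
    else pbbLoopB (lst ++ [String.ofList [c]]) rest
termination_by rest.length
decreasing_by
  · have h := List.length_dropWhile_le (p := fun x => x ≠ ']') rest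
    have h2 := congrArg List.length hdr
    simp at h h2 ⊢; omega
  · simp
  · simp

def parse_brackets_and_blanks_alt (s : String) : List String :=
  pbbLoopB [] s.toList

-- ===== PRECONDITION & SPEC =====
-- Pre_ excludes exactly the inputs on which the Python A raises AssertionError: an opening
-- bracket occurring after an unmatched opening bracket with no closing bracket in between
-- (B raises the same AssertionError there).
def Pre_parse_brackets_and_blanks (s : String) : Prop :=
  ∀ i < s.toList.length, s.toList.getD i ' ' = '[' →
    '[' ∉ (s.toList.drop (i + 1)).takeWhile (fun x => x ≠ ']')
instance (s : String) : Decidable (Pre_parse_brackets_and_blanks s) := by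
  unfold Pre_parse_brackets_and_blanks; infer_instance

def pvWitness_parse_brackets_and_blanks : String := "a-[bc]d"

def Spec_parse_brackets_and_blanks (s : String) (out : List String) : Prop := out = parse_brackets_and_blanks_alt s
instance (s : String) (out : List String) : Decidable (Spec_parse_brackets_and_blanks s out) := by unfold Spec_parse_brackets_and_blanks; infer_instance

-- ===== CLAIM (what is proved, stated in full; the proofs are below) =====
def Claim_equal_parse_brackets_and_blanks : Prop := ∀ (s : String), Dom_parse_brackets_and_blanks s → Pre_parse_brackets_and_blanks s → Spec_parse_brackets_and_blanks s (parse_brackets_and_blanks s)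

-- ===== LEMMAS AND PROOFS =====

-- the list-level form of Pre_
def pbbPre (cs : List Char) : Prop :=
  ∀ i < cs.length, cs.getD i ' ' = '[' →
    '[' ∉ (cs.drop (i + 1)).takeWhile (fun x => x ≠ ']')

theorem pbbPre_cons {c : Char} {cs : List Char} (h : pbbPre (c :: cs)) : pbbPre cs := by
  intro i hi hget
  have := h (i + 1) (by simp; omega) (by simpa using hget)
  simpa using this

theorem pbbPre_append {xs ys : List Char} (h : pbbPre (xs ++ ys)) : pbbPre ys := by
  induction xs with
  | nil => simpa using h
  | cons c xs ih => exact ih (pbbPre_cons h)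

theorem pbb_fill (body : List Char) (h : ∀ x ∈ body, x ≠ ']') :
    ∀ (rest' : List Char) (lst : List String) (cur : List Char),
      List.foldl pbbStepA (lst, true, cur) (body ++ rest')
        = List.foldl pbbStepA (lst, true, cur ++ body) rest' := by
  induction body with
  | nil => intro rest' lst cur; simp
  | cons b body ih =>
    intro rest' lst cur
    have hb : b ≠ ']' := h b (by simp)
    simp only [List.cons_append, List.foldl_cons, pbbStepA, if_true, if_neg hb]
    rw [ih (fun x hx => h x (by simp [hx]))]
    simp

theorem pbb_dropWhile_head {p : Char → Bool} {l : List Char} {d : Char} {t : List Char}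
    (h : l.dropWhile p = d :: t) : p d = false := by
  induction l with
  | nil => simp at h
  | cons a l ih =>
    rw [List.dropWhile_cons] at h
    by_cases hp : p a
    · simp [hp] at h; exact ih h
    · simp [hp] at h; rw [h.1] at hp; simpa using hp

theorem pbb_main : ∀ (n : Nat) (cs : List Char), cs.length ≤ n → pbbPre cs →
    ∀ lst, (List.foldl pbbStepA (lst, false, []) cs).1 = pbbLoopB lst cs := by
  intro n
  induction n with
  | zero =>
    intro cs hlen _ lst
    have : cs = [] := by cases cs <;> simp_all
    subst this; simp [pbbLoopB]
  | succ n ih =>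
    intro cs hlen hpre lst
    match cs with
    | [] => simp [pbbLoopB]
    | c :: rest =>
      by_cases hbr : c = '['
      · subst hbr
        have hsplit := List.takeWhile_append_dropWhile (p := fun x => x ≠ ']') (l := rest)
        set body := rest.takeWhile (fun x => x ≠ ']') with hbody
        have hbodyne : ∀ x ∈ body, x ≠ ']' := by
          intro x hx
          have := List.mem_takeWhile_imp hx
          simpa using this
        rw [List.foldl_cons]
        have hstep : pbbStepA (lst, false, []) '[' = (lst, true, ['[']) := by
          simp [pbbStepA]
        rw [hstep]
        match hdrop : rest.dropWhile (fun x => x ≠ ']') with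
        | [] =>
          -- unclosed bracket: rest = body, fold stays inside, result lst
          have hrest : rest = body := by rw [hdrop] at hsplit; simpa using hsplit.symm
          rw [show pbbLoopB lst ('[' :: rest) = lst by
            conv_lhs => rw [pbbLoopB.eq_def]
            simp only [if_true]
            rw [← hbody, hdrop]]
          rw [hrest, ← List.append_nil body]
          rw [pbb_fill body hbodyne [] lst ['[']]
          simp
        | d :: t =>
          have hd : d = ']' := by
            have := pbb_dropWhile_head hdrop
            simpa using this
          subst hd
          have hrest : rest = body ++ ']' :: t := by rw [hdrop] at hsplit; exact hsplit.symm
          rw [show pbbLoopB lst ('[' :: rest) = pbbLoopB (lst ++ [String.ofList ('[' :: (body ++ [']']))]) t by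
            conv_lhs => rw [pbbLoopB.eq_def]
            simp only [if_true]
            rw [← hbody, hdrop]]
          conv_lhs => rw [hrest]
          rw [pbb_fill body hbodyne (']' :: t) lst ['[']]
          rw [List.foldl_cons]
          have hstep3 : pbbStepA (lst, true, ['['] ++ body) ']'
              = (lst ++ [String.ofList ('[' :: (body ++ [']']))], false, []) := by
            simp [pbbStepA]
          rw [hstep3]
          have hlen' : t.length ≤ n := by
            have : rest.length = body.length + 1 + t.length := by rw [hrest]; simp; omega
            simp at hlen; omega
          have hpre' : pbbPre t := by
            have h1 : pbbPre rest := pbbPre_cons hpre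
            rw [hrest] at h1
            exact pbbPre_cons (pbbPre_append h1)
          exact ih t hlen' hpre' _
      · have hpre' : pbbPre rest := pbbPre_cons hpre
        have hlen' : rest.length ≤ n := by simp at hlen; omega
        by_cases hdash : c = '-'
        · subst hdash
          rw [List.foldl_cons]
          have hstep : pbbStepA (lst, false, []) '-' = (lst ++ [""], false, []) := by
            simp [pbbStepA]
          rw [hstep]
          rw [show pbbLoopB lst ('-' :: rest) = pbbLoopB (lst ++ [""]) rest by
            conv_lhs => rw [pbbLoopB.eq_def]
            simp only [if_neg (by decide : ¬ ('-' = '[')), if_true]]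
          exact ih rest hlen' hpre' _
        · rw [List.foldl_cons]
          have hstep : pbbStepA (lst, false, []) c = (lst ++ [String.ofList [c]], false, []) := by
            simp [pbbStepA, hbr, hdash]
          rw [hstep]
          rw [show pbbLoopB lst (c :: rest) = pbbLoopB (lst ++ [String.ofList [c]]) rest by
            conv_lhs => rw [pbbLoopB.eq_def]
            simp only [if_neg hbr, if_neg hdash]]
          exact ih rest hlen' hpre' _

-- ===== VERDICT (by name: the statement is the Claim_ definition above) =====
theorem parse_brackets_and_blanks_spec : Claim_equal_parse_brackets_and_blanks := by
  intro s _ hpre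
  unfold Spec_parse_brackets_and_blanks parse_brackets_and_blanks parse_brackets_and_blanks_alt
  exact pbb_main s.toList.length s.toList le_rfl hpre []
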